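-- pv_equiv track=rewrite | github.com/gavin-hyl/hidden-markov-model | hmm_utils.py | index_sequence
-- ===== SOURCE A (Python) =====
-- def index_sequence(seqs: list[list[object]]):
--     '''
--     Indexes a list of sequences.
--
--     Arguments:
--         seqs:   a list of sequences
--
--     Returns:
--         A tuple containing the indexed list and the object to index mapping
--     '''
--     obj_to_idx = {}
--     idx = 0
--     for seq in seqs:
--         for s in seq:
--             if obj_to_idx.get(s) is None:
--                 obj_to_idx.update({s: idx})
--                 idx += 1
--     indexed = []
--     for seq in seqs:
--         indexed.append([obj_to_idx.get(s) for s in seq])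
--     return indexed, obj_to_idx
-- ===== SOURCE B (Python) =====
-- def index_sequence(seqs: list[list[object]]):
--     '''Single fused pass: assign ids and build rows simultaneously.'''
--     obj_to_idx = {}
--     indexed = []
--     for seq in seqs:
--         row = []
--         for s in seq:
--             row.append(obj_to_idx.setdefault(s, len(obj_to_idx)))
--         indexed.append(row)
--     return indexed, obj_to_idx
-- ===== Notes on version B (the rewrite author's own statement) =====
-- stated objective: simpler
-- what changed: The two passes (one to build the mapping, one to index) are fused into a single pass that assigns ids via dict.setdefault and appends them to the current row as it goes.
import Mathlib
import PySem

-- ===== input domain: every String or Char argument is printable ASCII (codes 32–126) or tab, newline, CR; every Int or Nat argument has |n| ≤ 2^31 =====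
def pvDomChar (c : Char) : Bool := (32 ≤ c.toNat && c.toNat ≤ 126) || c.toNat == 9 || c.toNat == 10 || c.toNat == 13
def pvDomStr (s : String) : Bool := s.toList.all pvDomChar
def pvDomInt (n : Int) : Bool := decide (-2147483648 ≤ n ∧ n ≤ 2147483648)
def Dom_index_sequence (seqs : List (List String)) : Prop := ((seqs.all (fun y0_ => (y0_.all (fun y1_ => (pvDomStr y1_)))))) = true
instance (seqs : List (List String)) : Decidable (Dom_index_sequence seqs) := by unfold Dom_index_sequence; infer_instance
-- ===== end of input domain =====

-- B fuses A's two passes into one: ids are assigned via dict.setdefault while the indexed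
-- rows are built in the same loop (objective: simpler; same asymptotic cost).


-- ===== PORT A =====
-- inner body of A's first loop: 'if obj_to_idx.get(s) is None: obj_to_idx.update({s: idx}); idx += 1'
def aStep (q : PySem.Dict String Int × Int) (s : String) : PySem.Dict String Int × Int :=
  match q.1.get? s with
  | none => (q.1.insert s q.2, q.2 + 1)
  | some _ => q

def index_sequence (seqs : List (List String)) : List (List Int) × (List (String × Int)) :=
  -- first pass: build obj_to_idx with the running counter idx
  let p := seqs.foldl (fun p seq => seq.foldl aStep p) ((PySem.Dict.empty : PySem.Dict String Int), (0 : Int))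
  -- second pass: '[obj_to_idx.get(s) for s in seq]' — every s was inserted in the first
  -- pass, so .get(s) is its int id; ported as getD with an unreachable default 0
  (seqs.map (fun seq => seq.map (fun s => p.1.getD s 0)), p.1.items)

-- ===== PORT B =====
-- inner body of B's single loop: 'row.append(obj_to_idx.setdefault(s, len(obj_to_idx)))'
def bStep (q : List Int × PySem.Dict String Int) (s : String) : List Int × PySem.Dict String Int :=
  let d' := q.2.setdefault s (q.2.size : Int)
  (q.1 ++ [d'.getD s 0], d')

def index_sequence_alt (seqs : List (List String)) : List (List Int) × (List (String × Int)) :=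
  let r := seqs.foldl
    (fun p seq =>
      let q := seq.foldl bStep (([] : List Int), p.2)
      (p.1 ++ [q.1], q.2))
    (([] : List (List Int)), (PySem.Dict.empty : PySem.Dict String Int))
  (r.1, r.2.items)

-- ===== PRECONDITION & SPEC =====
def Spec_index_sequence (seqs : List (List String)) (out : List (List Int) × (List (String × Int))) : Prop := out = index_sequence_alt seqs
instance (seqs : List (List String)) (out : List (List Int) × (List (String × Int))) : Decidable (Spec_index_sequence seqs out) := by unfold Spec_index_sequence; infer_instance

-- ===== CLAIM (what is proved, stated in full; the proofs are below) =====
def Claim_equal_index_sequence : Prop := ∀ (seqs : List (List String)), Dom_index_sequence seqs → Spec_index_sequence seqs (index_sequence seqs)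

-- ===== LEMMAS AND PROOFS =====

-- the dict-building step both loops perform, and its iterations
def dStep (d : PySem.Dict String Int) (s : String) : PySem.Dict String Int :=
  d.setdefault s (d.size : Int)
def dBuild (d : PySem.Dict String Int) (xs : List String) : PySem.Dict String Int :=
  xs.foldl dStep d
def dBuildAll (d : PySem.Dict String Int) (seqs : List (List String)) : PySem.Dict String Int :=
  seqs.foldl dBuild d

-- one dStep preserves every existing binding
theorem get?_dStep_mono (d : PySem.Dict String Int) (s t : String) (v : Int)
    (h : d.get? t = some v) : (dStep d s).get? t = some v := by
  unfold dStep
  by_cases ht : t = s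
  · subst ht
    rw [show (d.setdefault t ((d.size : Int))).get? t = some ((d.get? t).getD (d.size : Int)) from
      by apply PySem.Dict.get?_setdefault_self, h]
    simp
  · rw [show (d.setdefault s ((d.size : Int))).get? t = d.get? t from
      by apply PySem.Dict.get?_setdefault_of_ne; exact ht]
    exact h

theorem get?_dBuild_mono (xs : List String) (d : PySem.Dict String Int) (t : String) (v : Int)
    (h : d.get? t = some v) : (dBuild d xs).get? t = some v := by
  induction xs generalizing d with
  | nil => exact h
  | cons x xs ih => exact ih (dStep d x) (get?_dStep_mono d x t v h)

theorem get?_dBuildAll_mono (seqs : List (List String)) (d : PySem.Dict String Int) (t : String) (v : Int)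
    (h : d.get? t = some v) : (dBuildAll d seqs).get? t = some v := by
  induction seqs generalizing d with
  | nil => exact h
  | cons seq rest ih => exact ih (dBuild d seq) (get?_dBuild_mono seq d t v h)

-- after dStep d s, the key s is bound
theorem get?_dStep_self (d : PySem.Dict String Int) (s : String) :
    ∃ v, (dStep d s).get? s = some v :=
  ⟨(d.get? s).getD (d.size : Int), by unfold dStep; apply PySem.Dict.get?_setdefault_self⟩

-- every element of xs is bound in dBuild d xs
theorem get?_dBuild_of_mem (xs : List String) (d : PySem.Dict String Int) (s : String)
    (h : s ∈ xs) : ∃ v, (dBuild d xs).get? s = some v := by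
  induction xs generalizing d with
  | nil => cases h
  | cons x rest ih =>
    rcases List.mem_cons.mp h with h | h
    · subst h
      obtain ⟨v, hv⟩ := get?_dStep_self d s
      exact ⟨v, get?_dBuild_mono rest (dStep d s) s v hv⟩
    · exact ih (dStep d x) h

-- B's inner loop: rows read their ids from the dict built so far
theorem bInner_spec (seq : List String) (d : PySem.Dict String Int) (acc : List Int) :
    seq.foldl bStep (acc, d)
      = (acc ++ seq.map (fun s => (dBuild d seq).getD s 0), dBuild d seq) := by
  induction seq generalizing d acc with
  | nil => simp [dBuild]
  | cons s rest ih =>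
    have hstep : bStep (acc, d) s = (acc ++ [(dStep d s).getD s 0], dStep d s) := rfl
    obtain ⟨v, hv⟩ := get?_dStep_self d s
    have hval : (dStep d s).getD s 0 = v := by
      apply PySem.Dict.getD_of_get?_eq_some; exact hv
    have hval' : (dBuild (dStep d s) rest).getD s 0 = v := by
      apply PySem.Dict.getD_of_get?_eq_some
      exact get?_dBuild_mono rest (dStep d s) s v hv
    simp only [List.foldl_cons, hstep, ih (dStep d s)]
    simp [dBuild, hval, List.append_assoc]
    simpa [dBuild] using hval'.symm

-- B's outer loop: all rows read their ids from the final dict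
theorem bOuter_spec (seqs : List (List String)) (d : PySem.Dict String Int) (rows : List (List Int)) :
    seqs.foldl (fun p seq => let q := seq.foldl bStep (([] : List Int), p.2); (p.1 ++ [q.1], q.2)) (rows, d)
      = (rows ++ seqs.map (fun seq => seq.map (fun s => (dBuildAll d seqs).getD s 0)), dBuildAll d seqs) := by
  induction seqs generalizing d rows with
  | nil => simp [dBuildAll]
  | cons seq rest ih =>
    simp only [List.foldl_cons, bInner_spec seq d, List.nil_append]
    rw [ih (dBuild d seq)]
    have hrow : seq.map (fun s => (dBuild d seq).getD s 0)
        = seq.map (fun s => (dBuildAll (dBuild d seq) rest).getD s 0) := by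
      apply List.map_congr_left
      intro s hs
      obtain ⟨v, hv⟩ := get?_dBuild_of_mem seq d s hs
      have h1 : (dBuild d seq).getD s 0 = v := by
        apply PySem.Dict.getD_of_get?_eq_some; exact hv
      have h2 : (dBuildAll (dBuild d seq) rest).getD s 0 = v := by
        apply PySem.Dict.getD_of_get?_eq_some
        exact get?_dBuildAll_mono rest (dBuild d seq) s v hv
      rw [h1, h2]
    simp [dBuildAll, hrow, List.append_assoc]

-- A's first pass equals the shared dict build: the counter idx is always the dict's size
theorem aInner_eq (xs : List String) (d : PySem.Dict String Int) :
    xs.foldl aStep (d, (d.size : Int)) = (dBuild d xs, ((dBuild d xs).size : Int)) := by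
  induction xs generalizing d with
  | nil => simp [dBuild]
  | cons x rest ih =>
    have hstep : aStep (d, (d.size : Int)) x = (dStep d x, ((dStep d x).size : Int)) := by
      unfold aStep dStep
      cases hg : d.get? x with
      | none =>
        have hc : d.contains x = false := (PySem.Dict.get?_eq_none_iff_contains d x).mp hg
        rw [show d.setdefault x ((d.size : Int)) = d.insert x ((d.size : Int)) from
          by apply PySem.Dict.setdefault_of_not_contains; exact hc]
        simp [PySem.Dict.size_insert, hc]
      | some v =>
        have hc : d.contains x = true := by
          rw [PySem.Dict.contains_eq_isSome_get?, hg]; rfl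
        rw [show d.setdefault x ((d.size : Int)) = d from
          by apply PySem.Dict.setdefault_of_contains; exact hc]
    simp only [List.foldl_cons, hstep, ih (dStep d x)]
    simp [dBuild]

theorem aOuter_eq (seqs : List (List String)) (d : PySem.Dict String Int) :
    seqs.foldl (fun p seq => seq.foldl aStep p) (d, (d.size : Int))
      = (dBuildAll d seqs, ((dBuildAll d seqs).size : Int)) := by
  induction seqs generalizing d with
  | nil => simp [dBuildAll]
  | cons seq rest ih =>
    simp only [List.foldl_cons, aInner_eq seq d, ih (dBuild d seq)]
    simp [dBuildAll]

-- ===== VERDICT (by name: the statement is the Claim_ definition above) =====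
theorem index_sequence_spec : Claim_equal_index_sequence := by
  intro seqs _
  unfold Spec_index_sequence index_sequence index_sequence_alt
  have hA := aOuter_eq seqs PySem.Dict.empty
  have hB := bOuter_spec seqs PySem.Dict.empty []
  simp only [PySem.Dict.size_empty, Nat.cast_zero] at hA
  rw [hA, hB]
  simp
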